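-- pv_equiv track=rewrite | github.com/jacobhoernlein/advent-of-code | 2023/day_03/main.py | num_str_locations
-- ===== SOURCE A (Python) =====
-- def is_symbol(c: str) -> bool:
--     """Returns true if the string is a symbol."""
--
--     return c != "." and not c.isalnum()
--
-- def get_next_num_str(chars: list[str], i: int) -> tuple[str, int]:
--     """Scans through the list and builds a string out of the first set
--     of characters that make a number. Returns that string and the index
--     following it.
--     """
--
--     num_str = ""
--
--     # Ignores leading periods and symbols.
--     while i < len(chars) and not chars[i].isdigit():
--         i += 1
--
--     # Builds string and stops when it's over.
--     while i < len(chars) and chars[i].isdigit():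
--         num_str += chars[i]
--         i += 1
--
--     return num_str, i
--
-- def check_perimeter(lines: list[str], row: int, start: int, end: int) -> bool:
--     """Checks the positions around the substring on the given row with
--     given start and end indexes for a symbol. If one is found, return
--     True. Else, False.
--     """
--
--     # Make sure indexes are in bounds.
--     if start > 0:
--         start -= 1
--     if end < len(lines[row]) - 1:
--         end += 1
--
--     # Check the row above, if it exists.
--     if row > 0:
--         for c in lines[row - 1][start:end + 1]:
--             if is_symbol(c):
--                 return True
--
--     # Check below, if it exists.
--     if row < len(lines) - 1:
--         for c in lines[row + 1][start:end + 1]: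
--             if is_symbol(c):
--                 return True
--
--     # Check to the left and right.
--     if is_symbol(lines[row][start]) or is_symbol(lines[row][end]):
--         return True
--
--     return False
--
-- def num_str_locations(lines: list[str]) -> dict[int, dict[int, str]]:
--     """Returns a dictionary that maps a row and column to a number
--     string at that location. If no number string exists at that
--     location, then the dictionary will throw a KeyError.
--     """
--
--     locations = dict[int, dict[int, str]]()
--
--     for line_num, line in enumerate(lines):
--         chars = list(line)
--         i = 0
--
--         # Need to add empty dictionary before we dereference by column.
--         locations[line_num] = {}
--
--         while True:
--             num_str, i = get_next_num_str(chars, i)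
--             if not num_str:
--                 break
--             j = i - len(num_str)
--             if check_perimeter(lines, line_num, j, i - 1):
--                 # Add every location covered by string into dictionary.
--                 while j < i:
--                     locations[line_num][j] = num_str
--                     j += 1
--
--     return locations
-- ===== SOURCE B (Python) =====
-- def num_str_locations(lines: list[str]) -> dict[int, dict[int, str]]:
--     """Symbol-set version: precompute all symbol coordinates once, find
--     digit runs in a single pass per line, then test the run's clamped
--     neighborhood by set membership."""
--     symbols = {(r, c) for r, line in enumerate(lines)
--                for c, ch in enumerate(line) if ch != "." and not ch.isalnum()}
--     locations = {}
--     for r, line in enumerate(lines):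
--         spans = []
--         start = None
--         for c, ch in enumerate(line):
--             if ch.isdigit():
--                 if start is None:
--                     start = c
--             elif start is not None:
--                 spans.append((start, c))
--                 start = None
--         if start is not None:
--             spans.append((start, len(line)))
--         row_map = {}
--         for s, e in spans:
--             lo, hi = max(s - 1, 0), min(e, len(line) - 1)
--             if any((rr, cc) in symbols
--                    for rr in (r - 1, r, r + 1) for cc in range(lo, hi + 1)):
--                 num = line[s:e]
--                 for c in range(s, e):
--                     row_map[c] = num
--         locations[r] = row_map
--     return locations
-- ===== Notes on version B (the rewrite author's own statement) =====
-- stated objective: alternative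
-- what changed: B precomputes one set of all symbol coordinates and extracts each line's digit runs in a single linear state-machine pass, then decides adjacency by membership of the run's clamped neighborhood in that set, instead of A's per-number rescan that re-slices the neighboring lines and probes characters around every number.
import Mathlib
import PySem

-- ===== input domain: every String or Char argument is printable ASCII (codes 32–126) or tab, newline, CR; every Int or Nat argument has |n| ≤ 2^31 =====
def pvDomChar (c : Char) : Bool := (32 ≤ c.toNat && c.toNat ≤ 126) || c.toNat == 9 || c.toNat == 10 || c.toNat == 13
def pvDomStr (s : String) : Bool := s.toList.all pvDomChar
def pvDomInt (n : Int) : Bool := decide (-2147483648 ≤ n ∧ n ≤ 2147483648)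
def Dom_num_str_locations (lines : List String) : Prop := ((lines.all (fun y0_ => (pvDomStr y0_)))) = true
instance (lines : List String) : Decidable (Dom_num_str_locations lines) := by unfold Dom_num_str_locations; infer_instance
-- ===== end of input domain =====

-- B replaces A's per-number neighborhood rescan by one precomputed symbol-coordinate set
-- plus a single-pass digit-run scanner per line (objective: alternative, same asymptotic cost).
-- Strings are handled on their toList side throughout, as the PySem prelude prescribes.

-- ===== PORT A =====

-- is_symbol (A applies it to one-character strings; ported on Char)
def pvIsSymbol (c : Char) : Bool := (c != '.') && !(PySem.Chars.isalnum c)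

-- first while-loop of get_next_num_str ("ignores leading periods and symbols");
-- fuel makes the loop total, the entry always supplies enough; the .getD default is
-- unreachable because the guard keeps the index in range (i ≥ 0 at every call).
def pvSkip (chars : List Char) : Int → Nat → Int
  | i, 0 => i
  | i, fuel+1 =>
    if i < (chars.length : Int) && !(PySem.Chars.isdigit ((PySem.List.pyGet? chars i).getD '0'))
    then pvSkip chars (i+1) fuel else i

-- second while-loop of get_next_num_str ("builds string and stops when it's over")
def pvBuild (chars : List Char) : List Char → Int → Nat → List Char × Int
  | num, i, 0 => (num, i)
  | num, i, fuel+1 =>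
    if i < (chars.length : Int) && PySem.Chars.isdigit ((PySem.List.pyGet? chars i).getD '0')
    then pvBuild chars (num ++ [(PySem.List.pyGet? chars i).getD '0']) (i+1) fuel
    else (num, i)

-- get_next_num_str (the number string kept as List Char, turned into String when stored)
def pvGetNextNumStr (chars : List Char) (i : Int) : List Char × Int :=
  pvBuild chars [] (pvSkip chars i (chars.length + 1)) (chars.length + 1)

-- check_perimeter; the for-loops with early `return True` over a slice are its `.any`;
-- the .getD defaults are unreachable (row and the probed columns are in range at every call).
def pvCheckPerimeter (lines : List String) (row start stop : Int) : Bool :=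
  let start1 := if start > 0 then start - 1 else start
  let rowLine := ((PySem.List.pyGet? lines row).getD "").toList
  let stop1 := if stop < (rowLine.length : Int) - 1 then stop + 1 else stop
  if row > 0 &&
      (PySem.List.slice (((PySem.List.pyGet? lines (row-1)).getD "").toList)
        (some start1) (some (stop1+1))).any pvIsSymbol then true
  else if row < (lines.length : Int) - 1 &&
      (PySem.List.slice (((PySem.List.pyGet? lines (row+1)).getD "").toList)
        (some start1) (some (stop1+1))).any pvIsSymbol then true
  else if pvIsSymbol ((PySem.List.pyGet? rowLine start1).getD '.')
       || pvIsSymbol ((PySem.List.pyGet? rowLine stop1).getD '.') then true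
  else false

-- the inner `while j < i` loop writing the number into the row's dictionary
def pvFill (i : Int) (numStr : String) : Int → PySem.Dict Int String → Nat → PySem.Dict Int String
  | _, row, 0 => row
  | j, row, fuel+1 =>
    if j < i then pvFill i numStr (j+1) (row.insert j numStr) fuel else row

-- the `while True` loop of one line (row = the dict A mutates at locations[line_num])
def pvRowLoop (lines : List String) (lineNum : Int) (chars : List Char) :
    Int → PySem.Dict Int String → Nat → PySem.Dict Int String
  | _, row, 0 => row
  | i, row, fuel+1 =>
    let r := pvGetNextNumStr chars i
    if r.1 = [] then row
    else
      let j := r.2 - (r.1.length : Int)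
      let row' := if pvCheckPerimeter lines lineNum j (r.2 - 1)
                  then pvFill r.2 (String.ofList r.1) j row (r.1.length + 1) else row
      pvRowLoop lines lineNum chars r.2 row' fuel

def num_str_locations (lines : List String) : List (Int × List (Int × String)) :=
  ((PySem.List.enumerate lines 0).foldl
    (fun locs p =>
      locs.insert p.1 (pvRowLoop lines p.1 p.2.toList 0 PySem.Dict.empty (p.2.toList.length + 1)))
    PySem.Dict.empty).items.map (fun p => (p.1, p.2.items))

-- ===== PORT B =====

-- the digit-run single pass: state = (spans so far, start of the open run or none)
def pvSpanStep (st : List (Int × Int) × Option Int) (q : Int × Char) :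
    List (Int × Int) × Option Int :=
  if PySem.Chars.isdigit q.2 then (st.1, if st.2.isNone then some q.1 else st.2)
  else match st.2 with
    | some s => (st.1 ++ [(s, q.1)], none)
    | none => st

def pvSpans (cs : List Char) : List (Int × Int) :=
  let st := (PySem.List.enumerate cs 0).foldl pvSpanStep ([], none)
  match st.2 with
  | some s => st.1 ++ [(s, (cs.length : Int))]
  | none => st.1

-- the symbol-coordinate set comprehension {(r, c) | lines[r][c] is a symbol}
def pvSymList (lines : List String) : List (Int × Int) :=
  (PySem.List.enumerate lines 0).flatMap (fun p =>
    ((PySem.List.enumerate p.2.toList 0).filter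
      (fun q => (q.2 != '.') && !(PySem.Chars.isalnum q.2))).map (fun q => (p.1, q.1)))

def pvSymbols (lines : List String) : PySem.Set (Int × Int) := PySem.Set.ofList (pvSymList lines)


-- body of B's per-span loop: clamp the neighborhood, test it against the symbol set,
-- and on success write the number over the span's columns
def pvAltRowStep (symbols : PySem.Set (Int × Int)) (cs : List Char) (r : Int)
    (row : PySem.Dict Int String) (se : Int × Int) : PySem.Dict Int String :=
  let lo := max (se.1 - 1) 0
  let hi := min se.2 ((cs.length : Int) - 1)
  if ([r - 1, r, r + 1].any (fun rr =>
       (PySem.List.pyRange lo (hi+1)).any (fun cc => PySem.Set.contains symbols (rr, cc))))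
  then (PySem.List.pyRange se.1 se.2).foldl
         (fun row c => row.insert c (String.ofList (PySem.List.slice cs (some se.1) (some se.2)))) row
  else row

def num_str_locations_alt (lines : List String) : List (Int × List (Int × String)) :=
  let symbols := pvSymbols lines
  ((PySem.List.enumerate lines 0).foldl
    (fun locs p =>
      locs.insert p.1 ((pvSpans p.2.toList).foldl (pvAltRowStep symbols p.2.toList p.1) PySem.Dict.empty))
    PySem.Dict.empty).items.map (fun p => (p.1, p.2.items))

-- ===== PRECONDITION & SPEC =====
def Spec_num_str_locations (lines : List String) (out : List (Int × List (Int × String))) : Prop := out = num_str_locations_alt lines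
instance (lines : List String) (out : List (Int × List (Int × String))) : Decidable (Spec_num_str_locations lines out) := by unfold Spec_num_str_locations; infer_instance

-- ===== CLAIM (what is proved, stated in full; the proofs are below) =====
def Claim_equal_num_str_locations : Prop := ∀ (lines : List String), Dom_num_str_locations lines → Spec_num_str_locations lines (num_str_locations lines)

-- ===== LEMMAS AND PROOFS =====


-- Bool: is the character at position i (Nat) of cs a digit (false past the end)
def pvDig (cs : List Char) (i : Nat) : Bool := PySem.Chars.isdigit (cs.getD i ' ')

-- reference scanner: first digit position at or after i
def pvRunStart (cs : List Char) (i : Nat) : Nat :=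
  if i < cs.length ∧ pvDig cs i = false then pvRunStart cs (i+1) else i
termination_by cs.length - i
decreasing_by omega

-- end of the digit run starting at i
def pvRunEnd (cs : List Char) (i : Nat) : Nat :=
  if i < cs.length ∧ pvDig cs i = true then pvRunEnd cs (i+1) else i
termination_by cs.length - i
decreasing_by omega

theorem pvRunStart_ge (cs : List Char) (i : Nat) : i ≤ pvRunStart cs i := by
  fun_induction pvRunStart cs i with
  | case1 i h ih => omega
  | case2 i h => omega

theorem pvRunStart_le (cs : List Char) (i : Nat) (hi : i ≤ cs.length) : pvRunStart cs i ≤ cs.length := by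
  fun_induction pvRunStart cs i with
  | case1 i h ih => exact ih (by omega)
  | case2 i h => omega

theorem pvRunStart_digit (cs : List Char) (i : Nat) (h2 : pvRunStart cs i < cs.length) :
    pvDig cs (pvRunStart cs i) = true := by
  fun_induction pvRunStart cs i with
  | case1 i h ih => exact ih h2
  | case2 i h =>
    by_cases hl : i < cs.length
    · rcases Bool.eq_false_or_eq_true (pvDig cs i) with ht | hf
      · exact ht
      · exact absurd ⟨hl, hf⟩ h
    · omega

theorem pvRunStart_between (cs : List Char) (i k : Nat) (hk1 : i ≤ k) (hk2 : k < pvRunStart cs i) :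
    pvDig cs k = false := by
  fun_induction pvRunStart cs i with
  | case1 i h ih =>
    by_cases hik : i = k
    · subst hik; exact h.2
    · exact ih (by omega) hk2
  | case2 i h => omega

theorem pvRunEnd_ge (cs : List Char) (i : Nat) : i ≤ pvRunEnd cs i := by
  fun_induction pvRunEnd cs i with
  | case1 i h ih => omega
  | case2 i h => omega

theorem pvRunEnd_le (cs : List Char) (i : Nat) (hi : i ≤ cs.length) : pvRunEnd cs i ≤ cs.length := by
  fun_induction pvRunEnd cs i with
  | case1 i h ih => exact ih (by omega)
  | case2 i h => omega

theorem pvRunEnd_digit (cs : List Char) (i k : Nat) (hk1 : i ≤ k) (hk2 : k < pvRunEnd cs i) :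
    pvDig cs k = true := by
  fun_induction pvRunEnd cs i with
  | case1 i h ih =>
    by_cases hik : i = k
    · subst hik; exact h.2
    · exact ih (by omega) hk2
  | case2 i h => omega

theorem pvRunEnd_stop (cs : List Char) (i : Nat) (h2 : pvRunEnd cs i < cs.length) :
    pvDig cs (pvRunEnd cs i) = false := by
  fun_induction pvRunEnd cs i with
  | case1 i h ih => exact ih h2
  | case2 i h =>
    by_cases hl : i < cs.length
    · rcases Bool.eq_false_or_eq_true (pvDig cs i) with ht | hf
      · exact absurd ⟨hl, ht⟩ h
      · exact hf
    · omega

theorem pvRunStart_succ (cs : List Char) (i : Nat) (hl : i < cs.length)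
    (hd : pvDig cs i = false) : pvRunStart cs i = pvRunStart cs (i+1) := by
  rw [pvRunStart]; simp [hl, hd]

theorem pvRunStart_stop (cs : List Char) (i : Nat)
    (h : ¬ (i < cs.length ∧ pvDig cs i = false)) : pvRunStart cs i = i := by
  rw [pvRunStart]; simp only [if_neg h]

theorem pvRunEnd_gt (cs : List Char) (i : Nat) (hl : i < cs.length) (hd : pvDig cs i = true) :
    i < pvRunEnd cs i := by
  rw [pvRunEnd]; rw [if_pos ⟨hl, hd⟩]
  exact lt_of_lt_of_le (by omega) (pvRunEnd_ge cs (i+1))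

-- the runs (maximal digit segments) of cs, from position i on, as Nat index pairs
def pvRunsFrom (cs : List Char) (i : Nat) : List (Nat × Nat) :=
  if h : pvRunStart cs i < cs.length then
    (pvRunStart cs i, pvRunEnd cs (pvRunStart cs i)) :: pvRunsFrom cs (pvRunEnd cs (pvRunStart cs i))
  else []
termination_by cs.length - i
decreasing_by
  have h1 := pvRunStart_ge cs i
  have h2 := pvRunEnd_gt cs (pvRunStart cs i) h (pvRunStart_digit cs i h)
  omega

theorem pvRunsFrom_spec (cs : List Char) (i : Nat) (hi : i ≤ cs.length) :
    ∀ se ∈ pvRunsFrom cs i, i ≤ se.1 ∧ se.1 < se.2 ∧ se.2 ≤ cs.length ∧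
      (∀ k, se.1 ≤ k → k < se.2 → pvDig cs k = true) := by
  fun_induction pvRunsFrom cs i with
  | case1 i h ih =>
    intro se hse
    rcases List.mem_cons.1 hse with rfl | hmem
    · refine ⟨pvRunStart_ge cs i, pvRunEnd_gt cs _ h (pvRunStart_digit cs i h), ?_, ?_⟩
      · exact pvRunEnd_le cs _ (by omega)
      · intro k hk1 hk2; exact pvRunEnd_digit cs _ k hk1 hk2
    · have hend : pvRunEnd cs (pvRunStart cs i) ≤ cs.length := pvRunEnd_le cs _ (by omega)
      have := ih hend se hmem
      have hgt := pvRunEnd_gt cs (pvRunStart cs i) h (pvRunStart_digit cs i h)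
      have hge := pvRunStart_ge cs i
      exact ⟨by omega, this.2⟩
  | case2 i _h => intro se hse; simp at hse

theorem pvSkip_eq (cs : List Char) (fuel : Nat) : ∀ (k : Nat), k ≤ cs.length →
    cs.length - k < fuel → pvSkip cs (k : Int) fuel = (pvRunStart cs k : Int) := by
  induction fuel with
  | zero => intro k hk hf; omega
  | succ f ih =>
    intro k hk hf
    by_cases hl : k < cs.length
    · have hget : (PySem.List.pyGet? cs (k : Int)).getD '0' = cs.getD k ' ' := by
        rw [PySem.List.pyGet?_natCast]
        simp [List.getElem?_eq_getElem hl, List.getD_eq_getElem?_getD]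
      rcases Bool.eq_false_or_eq_true (pvDig cs k) with ht | hfalse
      · have hdg : PySem.Chars.isdigit ((PySem.List.pyGet? cs (k : Int)).getD '0') = true := by
          rw [hget]; exact ht
        rw [pvSkip, pvRunStart_stop cs k (by simp [ht])]
        rw [PySem.List.pyGet?_natCast] at hdg
        simp [hdg]
      · have hdg : PySem.Chars.isdigit ((PySem.List.pyGet? cs (k : Int)).getD '0') = false := by
          rw [hget]; simpa [pvDig] using hfalse
        rw [pvSkip]
        have hc : ((k : Int) < (cs.length : Int) && !PySem.Chars.isdigit ((PySem.List.pyGet? cs (k : Int)).getD '0')) = true := by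
          simp only [Bool.and_eq_true, Bool.not_eq_true', decide_eq_true_eq]
          exact ⟨by exact_mod_cast hl, hdg⟩
        rw [if_pos hc]
        have : ((k : Int) + 1) = ((k + 1 : Nat) : Int) := by push_cast; ring
        rw [this, ih (k+1) (by omega) (by omega), pvRunStart_succ cs k hl hfalse]
    · have hkl : k = cs.length := by omega
      rw [pvSkip]
      have hc : ¬ (((k : Int) < (cs.length : Int) && !PySem.Chars.isdigit ((PySem.List.pyGet? cs (k : Int)).getD '0')) = true) := by
        simp; intro h; exfalso; exact absurd (by exact_mod_cast h) hl
      rw [if_neg hc, pvRunStart_stop cs k (by simp [hl])]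

theorem pvBuild_eq (cs : List Char) (fuel : Nat) : ∀ (k : Nat) (acc : List Char), k ≤ cs.length →
    cs.length - k < fuel →
    pvBuild cs acc (k : Int) fuel =
      (acc ++ (cs.drop k).take (pvRunEnd cs k - k), (pvRunEnd cs k : Int)) := by
  induction fuel with
  | zero => intro k acc hk hf; omega
  | succ f ih =>
    intro k acc hk hf
    have hget : ∀ (_ : k < cs.length), (PySem.List.pyGet? cs (k : Int)).getD '0' = cs.getD k ' ' := by
      intro hl
      rw [PySem.List.pyGet?_natCast]
      simp [List.getElem?_eq_getElem hl, List.getD_eq_getElem?_getD]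
    by_cases hcond : k < cs.length ∧ pvDig cs k = true
    · obtain ⟨hl, ht⟩ := hcond
      have hc : ((k : Int) < (cs.length : Int) && PySem.Chars.isdigit ((PySem.List.pyGet? cs (k : Int)).getD '0')) = true := by
        simp only [Bool.and_eq_true, decide_eq_true_eq]
        exact ⟨by exact_mod_cast hl, by rw [hget hl]; simpa [pvDig] using ht⟩
      rw [pvBuild, if_pos hc]
      have hcast : ((k : Int) + 1) = ((k + 1 : Nat) : Int) := by push_cast; ring
      rw [hcast, ih (k+1) _ (by omega) (by omega)]
      have hend : pvRunEnd cs k = pvRunEnd cs (k+1) := by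
        rw [pvRunEnd]; simp [hl, ht]
      have hdrop : cs.drop k = cs[k] :: cs.drop (k+1) := List.drop_eq_getElem_cons hl
      have htake : (cs.drop k).take (pvRunEnd cs k - k) =
          cs[k] :: (cs.drop (k+1)).take (pvRunEnd cs (k+1) - (k+1)) := by
        rw [hdrop]
        have hgt : k < pvRunEnd cs k := pvRunEnd_gt cs k hl ht
        have hstep : pvRunEnd cs k - k = (pvRunEnd cs (k+1) - (k+1)) + 1 := by
          rw [← hend]; omega
        rw [hstep, List.take_succ_cons]
      have hchar : (PySem.List.pyGet? cs (k : Int)).getD '0' = cs[k] := by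
        rw [PySem.List.pyGet?_natCast]; simp [List.getElem?_eq_getElem hl]
      rw [htake, hchar, ← hend]
      simp
    · have hstop : pvRunEnd cs k = k := by
        rw [pvRunEnd, if_neg hcond]
      have hc : ¬ (((k : Int) < (cs.length : Int) && PySem.Chars.isdigit ((PySem.List.pyGet? cs (k : Int)).getD '0')) = true) := by
        intro h
        simp only [Bool.and_eq_true, decide_eq_true_eq] at h
        obtain ⟨h1, h2⟩ := h
        have hl : k < cs.length := by exact_mod_cast h1
        rw [hget hl] at h2
        exact hcond ⟨hl, h2⟩
      rw [pvBuild, if_neg hc, hstop]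
      simp

theorem pvGetNext_eq (cs : List Char) (k : Nat) (hk : k ≤ cs.length) :
    pvGetNextNumStr cs (k : Int) =
      ((cs.drop (pvRunStart cs k)).take (pvRunEnd cs (pvRunStart cs k) - pvRunStart cs k),
       (pvRunEnd cs (pvRunStart cs k) : Int)) := by
  unfold pvGetNextNumStr
  rw [pvSkip_eq cs (cs.length + 1) k hk (by omega)]
  rw [pvBuild_eq cs (cs.length + 1) (pvRunStart cs k) [] (pvRunStart_le cs k hk) (by omega)]
  simp

theorem pvContains_false (d : PySem.Dict Int String) (j c : Int)
    (hb : ∀ x ∈ d.keys, x < j) (hc : j ≤ c) : d.contains c = false := by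
  simp only [PySem.Dict.contains, List.any_eq_false]
  intro p hp
  have : p.1 ∈ d.keys := List.mem_map_of_mem hp
  have := hb _ this
  simp only [beq_iff_eq]
  omega

theorem pvFill_foldl (iEnd : Int) (ns : String) : ∀ (fuel : Nat) (j : Int) (row : PySem.Dict Int String),
    (iEnd - j).toNat < fuel →
    pvFill iEnd ns j row fuel = (PySem.List.pyRange j iEnd).foldl (fun d c => d.insert c ns) row := by
  intro fuel
  induction fuel with
  | zero => intro j row hf; omega
  | succ f ih =>
    intro j row hf
    by_cases hj : j < iEnd
    · rw [pvFill, if_pos hj, PySem.List.pyRange_one_cons hj, List.foldl_cons]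
      exact ih (j+1) _ (by omega)
    · rw [pvFill, if_neg hj, PySem.List.pyRange_one_eq_nil (by omega), List.foldl_nil]

theorem pvFill_items (iEnd : Int) (ns : String) (j : Int) (row : PySem.Dict Int String)
    (fuel : Nat) (hf : (iEnd - j).toNat < fuel) (hb : ∀ x ∈ row.keys, x < j) :
    (pvFill iEnd ns j row fuel).items
      = row.items ++ (PySem.List.pyRange j iEnd).map (fun c => (c, ns)) := by
  rw [pvFill_foldl iEnd ns fuel j row hf]
  exact PySem.Dict.items_foldl_insert_fresh (PySem.List.pyRange j iEnd) (fun c => c) (fun _ => ns) row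
    (fun a ha => pvContains_false row j a hb (PySem.List.mem_pyRange_one.1 ha).1)
    (by simpa using PySem.List.nodup_pyRange_one j iEnd)

theorem pvFill_keys (iEnd : Int) (ns : String) (j : Int) (row : PySem.Dict Int String)
    (fuel : Nat) (hf : (iEnd - j).toNat < fuel) (hb : ∀ x ∈ row.keys, x < j) (hj : j ≤ iEnd) :
    ∀ x ∈ (pvFill iEnd ns j row fuel).keys, x < iEnd := by
  rw [pvFill_foldl iEnd ns fuel j row hf]
  intro x hx
  rw [PySem.Dict.keys_foldl_insert (PySem.List.pyRange j iEnd) (fun _ _ => ns) row] at hx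
  rcases (PySem.Set.mem_update _ _ _).1 hx with h | h
  · exact lt_of_lt_of_le (hb _ h) hj
  · exact (PySem.List.mem_pyRange_one.1 h).2

-- contribution of one run to the row's association list
def pvContrib (lines : List String) (r : Int) (cs : List Char) (se : Nat × Nat) : List (Int × String) :=
  if pvCheckPerimeter lines r (se.1 : Int) ((se.2 : Int) - 1)
  then (PySem.List.pyRange (se.1 : Int) (se.2 : Int)).map
    (fun c => (c, String.ofList ((cs.drop se.1).take (se.2 - se.1))))
  else []

theorem pvRowLoop_items (lines : List String) (r : Int) (cs : List Char) :
    ∀ (fuel : Nat) (k : Nat) (row : PySem.Dict Int String), k ≤ cs.length →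
    cs.length - k < fuel → (∀ x ∈ row.keys, x < (k : Int)) →
    (pvRowLoop lines r cs (k : Int) row fuel).items
      = row.items ++ (pvRunsFrom cs k).flatMap (pvContrib lines r cs) := by
  intro fuel
  induction fuel with
  | zero => intro k row hk hf hb; omega
  | succ f ih =>
    intro k row hk hf hb
    have hs := pvRunStart_ge cs k
    have hsle := pvRunStart_le cs k hk
    set s := pvRunStart cs k with hsdef
    by_cases hsl : s < cs.length
    · -- a run exists
      set e := pvRunEnd cs s with hedef
      have hes : s < e := pvRunEnd_gt cs s hsl (pvRunStart_digit cs k hsl)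
      have hele : e ≤ cs.length := pvRunEnd_le cs s (by omega)
      have hnumlen : ((cs.drop s).take (e - s)).length = e - s := by
        simp [List.length_take, List.length_drop]; omega
      have hnumne : (cs.drop s).take (e - s) ≠ [] := by
        intro hcon
        have := congrArg List.length hcon
        rw [hnumlen] at this
        simp at this; omega
      rw [pvRowLoop]
      rw [pvGetNext_eq cs k hk]
      simp only [← hsdef, ← hedef]
      rw [if_neg hnumne]
      have hjcast : (e : Int) - (((cs.drop s).take (e - s)).length : Int) = (s : Int) := by
        rw [hnumlen]; omega
      rw [pvRunsFrom]
      rw [dif_pos hsl]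
      simp only [← hsdef, ← hedef, List.flatMap_cons]
      rw [hjcast]
      -- the updated row
      by_cases hcond : pvCheckPerimeter lines r (s : Int) ((e : Int) - 1) = true
      · rw [if_pos hcond]
        have hfill_items := pvFill_items (e : Int) (String.ofList ((cs.drop s).take (e - s)))
          (s : Int) row (((cs.drop s).take (e - s)).length + 1)
          (by rw [hnumlen]; omega) (fun x hx => lt_of_lt_of_le (hb x hx) (by exact_mod_cast hs))
        have hfill_keys := pvFill_keys (e : Int) (String.ofList ((cs.drop s).take (e - s)))
          (s : Int) row (((cs.drop s).take (e - s)).length + 1)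
          (by rw [hnumlen]; omega) (fun x hx => lt_of_lt_of_le (hb x hx) (by exact_mod_cast hs))
          (by exact_mod_cast Nat.le_of_lt hes)
        rw [ih e _ hele (by omega) hfill_keys, hfill_items]
        unfold pvContrib
        rw [if_pos hcond]
        simp
      · rw [if_neg hcond]
        rw [ih e _ hele (by omega) (fun x hx => lt_of_lt_of_le (hb x hx) (by exact_mod_cast (by omega : k ≤ e)))]
        unfold pvContrib
        rw [if_neg hcond]
        simp
    · -- no more runs
      have hseq : s = cs.length := by omega
      have hnum : (cs.drop s).take (pvRunEnd cs s - s) = [] := by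
        rw [hseq]; simp
      rw [pvRowLoop, pvGetNext_eq cs k hk]
      simp only [← hsdef]
      rw [if_pos hnum]
      rw [pvRunsFrom]
      rw [dif_neg (by omega : ¬ pvRunStart cs k < cs.length)]
      simp

def pvFlush (st : List (Int × Int) × Option Int) (n : Int) : List (Int × Int) :=
  match st.2 with
  | some s => st.1 ++ [(s, n)]
  | none => st.1

theorem pvSpans_eq_flush (cs : List Char) :
    pvSpans cs = pvFlush ((PySem.List.enumerate cs 0).foldl pvSpanStep ([], none)) (cs.length : Int) := rfl

theorem pvSpanStep_nondigit : ∀ (l : List Char) (k : Int) (acc : List (Int × Int)),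
    (∀ c ∈ l, PySem.Chars.isdigit c = false) →
    (PySem.List.enumerate l k).foldl pvSpanStep (acc, none) = (acc, none) := by
  intro l
  induction l with
  | nil => intro k acc h; simp [PySem.List.enumerate]
  | cons c t iht =>
    intro k acc h
    rw [PySem.List.enumerate_cons, List.foldl_cons]
    have hc : PySem.Chars.isdigit c = false := h c (by simp)
    have : pvSpanStep (acc, none) (k, c) = (acc, none) := by
      simp [pvSpanStep, hc]
    rw [this]
    exact iht (k+1) acc (fun x hx => h x (by simp [hx]))

theorem pvSpanStep_digit : ∀ (l : List Char) (k : Int) (acc : List (Int × Int)) (s : Int),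
    (∀ c ∈ l, PySem.Chars.isdigit c = true) →
    (PySem.List.enumerate l k).foldl pvSpanStep (acc, some s) = (acc, some s) := by
  intro l
  induction l with
  | nil => intro k acc s h; simp [PySem.List.enumerate]
  | cons c t iht =>
    intro k acc s h
    rw [PySem.List.enumerate_cons, List.foldl_cons]
    have hc : PySem.Chars.isdigit c = true := h c (by simp)
    have : pvSpanStep (acc, some s) (k, c) = (acc, some s) := by
      simp [pvSpanStep, hc]
    rw [this]
    exact iht (k+1) acc s (fun x hx => h x (by simp [hx]))

theorem pvRunsFrom_congr (cs : List Char) (a b : Nat) (h : pvRunStart cs a = pvRunStart cs b) :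
    pvRunsFrom cs a = pvRunsFrom cs b := by
  rw [pvRunsFrom, h]
  conv_rhs => rw [pvRunsFrom]

theorem pvDig_getElem (cs : List Char) (k : Nat) (hk : k < cs.length) :
    PySem.Chars.isdigit cs[k] = pvDig cs k := by
  simp [pvDig, List.getD_eq_getElem?_getD, List.getElem?_eq_getElem hk]

theorem pvSpans_aux (cs : List Char) : ∀ (n : Nat) (k : Nat) (acc : List (Int × Int)),
    cs.length - k ≤ n → k ≤ cs.length →
    pvFlush ((PySem.List.enumerate (cs.drop k) (k : Int)).foldl pvSpanStep (acc, none)) (cs.length : Int)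
      = acc ++ (pvRunsFrom cs k).map (fun se => ((se.1 : Int), (se.2 : Int))) := by
  intro n
  induction n with
  | zero =>
    intro k acc hn hk
    have hkl : k = cs.length := by omega
    have hstart : pvRunStart cs k = k := pvRunStart_stop cs k (by omega)
    rw [pvRunsFrom, dif_neg (by rw [hstart]; omega), hkl]
    simp [pvFlush]
  | succ n ihn =>
    intro k acc hn hk
    have hs := pvRunStart_ge cs k
    have hsle := pvRunStart_le cs k hk
    set s := pvRunStart cs k with hsdef
    -- leading non-digit segment [k, s)
    have hsplit1 : cs.drop k = (cs.drop k).take (s - k) ++ cs.drop s := by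
      have h1 : cs.drop s = (cs.drop k).drop (s - k) := by
        rw [List.drop_drop]
        congr 1
        omega
      rw [h1, List.take_append_drop]
    have hlen1 : ((cs.drop k).take (s - k)).length = s - k := by
      simp [List.length_take, List.length_drop]; omega
    have hnd1 : ∀ c ∈ (cs.drop k).take (s - k), PySem.Chars.isdigit c = false := by
      intro c hc
      obtain ⟨m, hm, rfl⟩ := List.getElem_of_mem hc
      rw [hlen1] at hm
      have hmlen : k + m < cs.length := by omega
      rw [List.getElem_take, List.getElem_drop]
      rw [pvDig_getElem cs (k + m) hmlen]
      exact pvRunStart_between cs k (k + m) (by omega) (by omega)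
    by_cases hsl : s < cs.length
    · set e := pvRunEnd cs s with hedef
      have hdigS : pvDig cs s = true := by
        rw [hsdef]; exact pvRunStart_digit cs k (by omega)
      have hes : s < e := pvRunEnd_gt cs s hsl hdigS
      have hele : e ≤ cs.length := pvRunEnd_le cs s (by omega)
      -- digit segment [s, e)
      have hsplit2 : cs.drop s = (cs.drop s).take (e - s) ++ cs.drop e := by
        have h1 : cs.drop e = (cs.drop s).drop (e - s) := by
          rw [List.drop_drop]
          congr 1
          omega
        rw [h1, List.take_append_drop]
      have hlen2 : ((cs.drop s).take (e - s)).length = e - s := by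
        simp [List.length_take, List.length_drop]; omega
      have hseg2 : (cs.drop s).take (e - s) = cs[s]'(hsl) :: ((cs.drop (s+1)).take (e - (s+1))) := by
        rw [List.drop_eq_getElem_cons hsl]
        have : e - s = (e - (s+1)) + 1 := by omega
        rw [this, List.take_succ_cons]
      have hd2 : ∀ c ∈ (cs.drop (s+1)).take (e - (s+1)), PySem.Chars.isdigit c = true := by
        intro c hc
        obtain ⟨m, hm, rfl⟩ := List.getElem_of_mem hc
        have hlen2' : ((cs.drop (s+1)).take (e - (s+1))).length = e - (s+1) := by
          simp [List.length_take, List.length_drop]; omega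
        rw [hlen2'] at hm
        have hmlen : (s+1) + m < cs.length := by omega
        rw [List.getElem_take, List.getElem_drop]
        rw [pvDig_getElem cs ((s+1) + m) hmlen]
        exact pvRunEnd_digit cs s ((s+1)+m) (by omega) (by omega)
      -- unfold runs
      rw [pvRunsFrom, dif_pos (hsdef ▸ hsl)]
      simp only [← hsdef, ← hedef, List.map_cons]
      -- fold the leading segment
      rw [hsplit1, PySem.List.enumerate_append, List.foldl_append]
      rw [pvSpanStep_nondigit _ _ acc hnd1]
      rw [hlen1]
      have hcast1 : (k : Int) + ((s - k : Nat) : Int) = (s : Int) := by omega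
      rw [hcast1]
      -- fold the digit segment
      rw [hsplit2, PySem.List.enumerate_append, List.foldl_append]
      rw [hlen2]
      have hcast2 : (s : Int) + ((e - s : Nat) : Int) = (e : Int) := by omega
      rw [hcast2]
      rw [hseg2, PySem.List.enumerate_cons, List.foldl_cons]
      have hdigs : PySem.Chars.isdigit (cs[s]'(hsl)) = true := by
        rw [pvDig_getElem cs s hsl]
        exact pvRunStart_digit cs k hsl
      have hstep1 : pvSpanStep (acc, none) ((s : Int), cs[s]'(hsl)) = (acc, some (s : Int)) := by
        simp [pvSpanStep, hdigs]
      rw [hstep1]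
      rw [pvSpanStep_digit _ _ acc (s : Int) hd2]
      -- now at position e with state (acc, some s)
      by_cases hel : e < cs.length
      · have hnde : PySem.Chars.isdigit (cs[e]'(hel)) = false := by
          rw [pvDig_getElem cs e hel]
          exact pvRunEnd_stop cs s hel
        rw [List.drop_eq_getElem_cons hel, PySem.List.enumerate_cons, List.foldl_cons]
        have hstep2 : pvSpanStep (acc, some (s : Int)) ((e : Int), cs[e]'(hel)) = (acc ++ [((s : Int), (e : Int))], none) := by
          simp [pvSpanStep, hnde]
        rw [hstep2]
        have hcast3 : (e : Int) + 1 = ((e + 1 : Nat) : Int) := by push_cast; ring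
        rw [hcast3]
        rw [ihn (e+1) (acc ++ [((s : Int), (e : Int))]) (by omega) (by omega)]
        rw [pvRunsFrom_congr cs (e+1) e ?_]
        · simp
        · exact (pvRunStart_succ cs e hel (by rw [← pvDig_getElem cs e hel]; exact hnde)).symm
      · have hee : e = cs.length := by omega
        have hre : pvRunsFrom cs e = [] := by
          rw [pvRunsFrom]
          rw [pvRunStart_stop cs e (fun h => absurd h.1 (by omega))]
          rw [dif_neg (by omega)]
        rw [hre, hee, List.drop_length]
        simp [pvFlush]
    · -- no run: s = cs.length
      have hseq : s = cs.length := by omega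
      have hdropS : cs.drop s = [] := by rw [hseq, List.drop_length]
      rw [hsplit1, hdropS, List.append_nil, pvSpanStep_nondigit _ _ acc hnd1]
      rw [pvRunsFrom, dif_neg (by omega)]
      simp [pvFlush]

theorem pvSpans_eq_runs (cs : List Char) :
    pvSpans cs = (pvRunsFrom cs 0).map (fun se => ((se.1 : Int), (se.2 : Int))) := by
  rw [pvSpans_eq_flush]
  have := pvSpans_aux cs cs.length 0 [] (by omega) (by omega)
  simpa using this

-- "there is a symbol at integer coordinates (rr, cc)"
def pvSymP (lines : List String) (rr cc : Int) : Prop :=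
  ∃ k m : Nat, rr = (k : Int) ∧ cc = (m : Int) ∧ k < lines.length ∧
    m < (lines.getD k "").toList.length ∧ pvIsSymbol ((lines.getD k "").toList.getD m ' ') = true

theorem pvSym_contains (lines : List String) (rr cc : Int) :
    PySem.Set.contains (pvSymbols lines) (rr, cc) = true ↔ pvSymP lines rr cc := by
  have hmem : PySem.Set.contains (pvSymbols lines) (rr, cc) = true ↔ (rr, cc) ∈ pvSymList lines := by
    simp only [PySem.Set.contains, pvSymbols, List.contains_iff_mem]
    exact PySem.Set.mem_ofList _ _
  rw [hmem]
  unfold pvSymList pvSymP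
  simp only [List.mem_flatMap, List.mem_map, List.mem_filter,
    PySem.List.mem_enumerate_iff]
  constructor
  · rintro ⟨p, ⟨k, hk, rfl⟩, q, ⟨⟨m, hm, rfl⟩, hsym⟩, heq⟩
    refine ⟨k, m, ?_, ?_, hk, ?_, ?_⟩
    · simpa using congrArg Prod.fst heq.symm
    · simpa using congrArg Prod.snd heq.symm
    · simpa [List.getD_eq_getElem?_getD, List.getElem?_eq_getElem hk] using hm
    · have : pvIsSymbol (lines[k].toList[m]) = true := by
        simpa [pvIsSymbol] using hsym
      simpa [List.getD_eq_getElem?_getD, List.getElem?_eq_getElem hk,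
        List.getElem?_eq_getElem hm] using this
  · rintro ⟨k, m, rfl, rfl, hk, hm, hsym⟩
    have hm' : m < lines[k].toList.length := by
      simpa [List.getD_eq_getElem?_getD, List.getElem?_eq_getElem hk] using hm
    refine ⟨(0 + (k : Int), lines[k]), ⟨k, hk, rfl⟩,
      (0 + (m : Int), lines[k].toList[m]), ⟨⟨m, hm', rfl⟩, ?_⟩, by simp⟩
    have : pvIsSymbol (lines[k].toList[m]) = true := by
      simpa [List.getD_eq_getElem?_getD, List.getElem?_eq_getElem hk,
        List.getElem?_eq_getElem hm'] using hsym
    simpa [pvIsSymbol] using this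

theorem pvAny_slice (l : List Char) (a b : Int) (ha : 0 ≤ a) (hb : 0 ≤ b) :
    (PySem.List.slice l (some a) (some b)).any pvIsSymbol = true ↔
      ∃ m : Nat, a ≤ (m : Int) ∧ (m : Int) < b ∧ m < l.length ∧
        pvIsSymbol (l.getD m ' ') = true := by
  rw [PySem.List.slice_toNat l ha hb]
  rw [List.any_eq_true]
  constructor
  · rintro ⟨c, hc, hsym⟩
    obtain ⟨idx, hidx, rfl⟩ := List.getElem_of_mem hc
    have hlt : idx < b.toNat - a.toNat ∧ a.toNat + idx < l.length := by
      have h1 := hidx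
      simp [List.length_take, List.length_drop] at h1
      omega
    refine ⟨a.toNat + idx, by omega, by omega, hlt.2, ?_⟩
    rw [List.getElem_take, List.getElem_drop] at hsym
    simpa [List.getD_eq_getElem?_getD, List.getElem?_eq_getElem hlt.2] using hsym
  · rintro ⟨m, hma, hmb, hml, hsym⟩
    have hidx : m - a.toNat < b.toNat - a.toNat ∧ m - a.toNat < l.length - a.toNat := by omega
    refine ⟨l[m], ?_, ?_⟩
    · rw [List.mem_iff_getElem]
      refine ⟨m - a.toNat, by simp [List.length_take, List.length_drop]; omega, ?_⟩
      rw [List.getElem_take, List.getElem_drop]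
      congr 1
      omega
    · simpa [List.getD_eq_getElem?_getD, List.getElem?_eq_getElem hml] using hsym

theorem pvAny_range_contains (lines : List String) (t : Nat) (ht : t < lines.length)
    (a b : Int) (ha : 0 ≤ a) (hb : 0 ≤ b) :
    (PySem.List.pyRange a b).any (fun cc => PySem.Set.contains (pvSymbols lines) (((t : Int)), cc))
      = (PySem.List.slice (lines[t].toList) (some a) (some b)).any pvIsSymbol := by
  rcases Bool.eq_false_or_eq_true ((PySem.List.slice (lines[t].toList) (some a) (some b)).any pvIsSymbol) with hcase | hcase
  · rw [hcase, List.any_eq_true]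
    obtain ⟨m, hma, hmb, hml, hsym⟩ := (pvAny_slice _ a b ha hb).1 hcase
    refine ⟨(m : Int), PySem.List.mem_pyRange_one.2 ⟨hma, hmb⟩, ?_⟩
    rw [pvSym_contains]
    exact ⟨t, m, rfl, rfl, ht, by simpa [List.getD_eq_getElem?_getD, List.getElem?_eq_getElem ht] using hml,
      by simpa [List.getD_eq_getElem?_getD, List.getElem?_eq_getElem ht] using hsym⟩
  · rw [hcase, List.any_eq_false]
    intro cc hcc
    rw [Bool.not_eq_true, ← Bool.not_eq_true]
    intro hcontains
    obtain ⟨k, m, hkk, rfl, hk, hm, hsym⟩ := (pvSym_contains lines _ _).1 hcontains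
    have hkt : t = k := by exact_mod_cast hkk
    subst hkt
    have hrange := PySem.List.mem_pyRange_one.1 hcc
    have hm' : m < lines[t].toList.length := by
      simpa [List.getD_eq_getElem?_getD, List.getElem?_eq_getElem hk] using hm
    have hsym' : pvIsSymbol (lines[t].toList.getD m ' ') = true := by
      simpa [List.getD_eq_getElem?_getD, List.getElem?_eq_getElem hk] using hsym
    have := (pvAny_slice (lines[t].toList) a b ha hb).2 ⟨m, hrange.1, hrange.2, hm', hsym'⟩
    rw [hcase] at this
    exact Bool.false_ne_true this

theorem pvAny_range_contains_out (lines : List String) (rr : Int)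
    (hout : rr < 0 ∨ (lines.length : Int) ≤ rr) (a b : Int) :
    (PySem.List.pyRange a b).any (fun cc => PySem.Set.contains (pvSymbols lines) (rr, cc)) = false := by
  rw [List.any_eq_false]
  intro cc hcc
  rw [Bool.not_eq_true, ← Bool.not_eq_true]
  intro hcontains
  obtain ⟨k, m, rfl, rfl, hk, hm, hsym⟩ := (pvSym_contains lines _ _).1 hcontains
  rcases hout with h | h
  · omega
  · have : (k : Int) < (lines.length : Int) := by exact_mod_cast hk
    omega

theorem pvIsSymbol_digit (c : Char) (h : PySem.Chars.isdigit c = true) : pvIsSymbol c = false := by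
  simp [pvIsSymbol, PySem.Chars.isalnum, h]

theorem pvMid (cs : List Char) (s e : Nat) (hse : s < e) (hel : e ≤ cs.length)
    (hdig : ∀ k, s ≤ k → k < e → pvDig cs k = true) :
    (∃ m : Nat, ((s - 1 : Nat) : Int) ≤ (m : Int) ∧ (m : Int) < ((min e (cs.length - 1) : Nat) : Int) + 1 ∧
        m < cs.length ∧ pvIsSymbol (cs.getD m ' ') = true)
      ↔ (pvIsSymbol (cs.getD (s - 1) ' ') = true ∨
         pvIsSymbol (cs.getD (min e (cs.length - 1)) ' ') = true) := by
  constructor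
  · rintro ⟨m, h1, h2, h3, h4⟩
    have h1' : s - 1 ≤ m := by exact_mod_cast h1
    have h2' : m ≤ min e (cs.length - 1) := by omega
    by_cases hlo : m = s - 1
    · left; rw [← hlo]; exact h4
    · by_cases hhi : m = min e (cs.length - 1)
      · right; rw [← hhi]; exact h4
      · exfalso
        have hsm : s ≤ m := by omega
        have hme : m < e := by omega
        have := pvIsSymbol_digit (cs.getD m ' ') (hdig m hsm hme)
        rw [h4] at this
        exact absurd this (by decide)
  · rintro (h | h)
    · refine ⟨s - 1, by omega, by push_cast; omega, by omega, h⟩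
    · refine ⟨min e (cs.length - 1), by push_cast; omega, by push_cast; omega, by omega, h⟩

theorem pvPerim (lines : List String) (r : Nat) (hr : r < lines.length) (s e : Nat)
    (hse : s < e) (hel : e ≤ lines[r].toList.length)
    (hdig : ∀ k, s ≤ k → k < e → pvDig (lines[r].toList) k = true) :
    ([(r : Int) - 1, (r : Int), (r : Int) + 1].any (fun rr =>
       (PySem.List.pyRange (max ((s : Int) - 1) 0)
          ((min (e : Int) (((lines[r].toList.length : Nat) : Int) - 1)) + 1)).any
         (fun cc => PySem.Set.contains (pvSymbols lines) (rr, cc))))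
     = pvCheckPerimeter lines (r : Int) (s : Int) ((e : Int) - 1) := by
  set cs := lines[r].toList with hcs
  have hlen1 : 1 ≤ cs.length := by omega
  have hlo : max ((s : Int) - 1) 0 = ((s - 1 : Nat) : Int) := by omega
  have hhi : min (e : Int) ((cs.length : Int) - 1) = ((min e (cs.length - 1) : Nat) : Int) := by
    push_cast; omega
  set loN : Nat := s - 1 with hloN
  set hiN : Nat := min e (cs.length - 1) with hhiN
  have hloN_lt : loN < cs.length := by omega
  have hhiN_lt : hiN < cs.length := by omega
  have hloN_le_hiN : loN ≤ hiN := by omega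
  -- the A side, unfolded
  have hrowline : ((PySem.List.pyGet? lines (r : Int)).getD "").toList = cs := by
    rw [PySem.List.pyGet?_natCast, List.getElem?_eq_getElem hr]
    rfl
  have hstart1 : (if ((s : Int)) > 0 then (s : Int) - 1 else (s : Int)) = (loN : Int) := by
    split_ifs with h
    · omega
    · omega
  have hstop1 : (if ((e : Int) - 1) < ((cs.length : Int)) - 1 then ((e : Int) - 1) + 1 else ((e : Int) - 1)) = (hiN : Int) := by
    split_ifs with h
    · omega
    · omega
  -- the three B disjuncts
  have hBsplit : ([(r : Int) - 1, (r : Int), (r : Int) + 1].any (fun rr =>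
       (PySem.List.pyRange (max ((s : Int) - 1) 0) ((min (e : Int) ((cs.length : Int) - 1)) + 1)).any
         (fun cc => PySem.Set.contains (pvSymbols lines) (rr, cc))))
     = (((PySem.List.pyRange (loN : Int) ((hiN : Int) + 1)).any
          (fun cc => PySem.Set.contains (pvSymbols lines) ((r : Int) - 1, cc)))
        || ((PySem.List.pyRange (loN : Int) ((hiN : Int) + 1)).any
          (fun cc => PySem.Set.contains (pvSymbols lines) ((r : Int), cc)))
        || ((PySem.List.pyRange (loN : Int) ((hiN : Int) + 1)).any
          (fun cc => PySem.Set.contains (pvSymbols lines) ((r : Int) + 1, cc)))) := by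
    rw [hlo, hhi]
    simp [Bool.or_assoc]
  rw [hBsplit]
  -- above row
  have hAbove : ((PySem.List.pyRange (loN : Int) ((hiN : Int) + 1)).any
      (fun cc => PySem.Set.contains (pvSymbols lines) ((r : Int) - 1, cc)))
    = ((r : Int) > 0 && (PySem.List.slice (((PySem.List.pyGet? lines ((r : Int) - 1)).getD "").toList)
        (some (loN : Int)) (some ((hiN : Int) + 1))).any pvIsSymbol) := by
    by_cases hr0 : r = 0
    · subst hr0
      rw [pvAny_range_contains_out lines _ (by left; omega)]
      simp
    · have hcast : (r : Int) - 1 = ((r - 1 : Nat) : Int) := by omega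
      rw [hcast, pvAny_range_contains lines (r - 1) (by omega) _ _ (by omega) (by omega)]
      rw [PySem.List.pyGet?_natCast, List.getElem?_eq_getElem (by omega : r - 1 < lines.length)]
      have : ((r : Int) > 0) = True := by simp; omega
      simp only [Option.getD_some]
      rw [decide_eq_true (by omega : (r : Int) > 0)]
      simp
  -- below row
  have hBelow : ((PySem.List.pyRange (loN : Int) ((hiN : Int) + 1)).any
      (fun cc => PySem.Set.contains (pvSymbols lines) ((r : Int) + 1, cc)))
    = ((r : Int) < (lines.length : Int) - 1 && (PySem.List.slice (((PySem.List.pyGet? lines ((r : Int) + 1)).getD "").toList)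
        (some (loN : Int)) (some ((hiN : Int) + 1))).any pvIsSymbol) := by
    by_cases hrn : r + 1 < lines.length
    · have hcast : (r : Int) + 1 = ((r + 1 : Nat) : Int) := by push_cast; omega
      rw [hcast, pvAny_range_contains lines (r + 1) hrn _ _ (by omega) (by omega)]
      rw [PySem.List.pyGet?_natCast, List.getElem?_eq_getElem hrn]
      simp only [Option.getD_some]
      rw [decide_eq_true (show (r : Int) < (lines.length : Int) - 1 by omega)]
      simp
    · rw [pvAny_range_contains_out lines _ (by right; omega)]
      rw [decide_eq_false (by omega : ¬ ((r : Int) < (lines.length : Int) - 1))]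
      simp
  -- middle row
  have hMidRow : ((PySem.List.pyRange (loN : Int) ((hiN : Int) + 1)).any
      (fun cc => PySem.Set.contains (pvSymbols lines) ((r : Int), cc)))
    = (pvIsSymbol ((PySem.List.pyGet? cs (loN : Int)).getD '.')
       || pvIsSymbol ((PySem.List.pyGet? cs (hiN : Int)).getD '.')) := by
    rw [pvAny_range_contains lines r hr _ _ (by omega) (by omega)]
    rw [← hcs]
    have hg1 : (PySem.List.pyGet? cs (loN : Int)).getD '.' = cs.getD loN ' ' := by
      rw [PySem.List.pyGet?_natCast, List.getElem?_eq_getElem hloN_lt]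
      simp [List.getD_eq_getElem?_getD, List.getElem?_eq_getElem hloN_lt]
    have hg2 : (PySem.List.pyGet? cs (hiN : Int)).getD '.' = cs.getD hiN ' ' := by
      rw [PySem.List.pyGet?_natCast, List.getElem?_eq_getElem hhiN_lt]
      simp [List.getD_eq_getElem?_getD, List.getElem?_eq_getElem hhiN_lt]
    rw [hg1, hg2]
    rcases Bool.eq_false_or_eq_true ((PySem.List.slice cs (some (loN : Int)) (some ((hiN : Int) + 1))).any pvIsSymbol) with hc | hc
    · rw [hc]
      have := (pvMid cs s e hse hel hdig).1 ((pvAny_slice cs _ _ (by omega) (by omega)).1 hc)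
      rcases this with h | h
      · rw [hloN] at *; rw [h]; simp
      · rw [hhiN] at *; rw [h]; simp
    · rw [hc]
      have hnot := (pvAny_slice cs (loN : Int) ((hiN : Int) + 1) (by omega) (by omega))
      rw [hc] at hnot
      have hno : ¬ (pvIsSymbol (cs.getD loN ' ') = true ∨ pvIsSymbol (cs.getD hiN ' ') = true) := by
        intro hcon
        have := (pvMid cs s e hse hel hdig).2 hcon
        have := hnot.2 this
        exact Bool.false_ne_true this
      have hA : pvIsSymbol (cs.getD loN ' ') = false := by
        rcases Bool.eq_false_or_eq_true (pvIsSymbol (cs.getD loN ' ')) with h | h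
        · exact absurd (Or.inl h) hno
        · exact h
      have hB : pvIsSymbol (cs.getD hiN ' ') = false := by
        rcases Bool.eq_false_or_eq_true (pvIsSymbol (cs.getD hiN ' ')) with h | h
        · exact absurd (Or.inr h) hno
        · exact h
      rw [hA, hB]
      rfl
  rw [hAbove, hBelow, hMidRow]
  -- now both sides are the same three tests; unfold A's definition
  show _ = pvCheckPerimeter lines (r : Int) (s : Int) ((e : Int) - 1)
  unfold pvCheckPerimeter
  simp only [hrowline, hstart1, hstop1]
  rcases Bool.eq_false_or_eq_true ((r : Int) > 0 && (PySem.List.slice (((PySem.List.pyGet? lines ((r : Int) - 1)).getD "").toList)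
        (some (loN : Int)) (some ((hiN : Int) + 1))).any pvIsSymbol) with h1 | h1 <;>
  rcases Bool.eq_false_or_eq_true ((r : Int) < (lines.length : Int) - 1 && (PySem.List.slice (((PySem.List.pyGet? lines ((r : Int) + 1)).getD "").toList)
        (some (loN : Int)) (some ((hiN : Int) + 1))).any pvIsSymbol) with h2 | h2 <;>
  rcases Bool.eq_false_or_eq_true (pvIsSymbol ((PySem.List.pyGet? cs (loN : Int)).getD '.')
       || pvIsSymbol ((PySem.List.pyGet? cs (hiN : Int)).getD '.')) with h3 | h3 <;>
  (rw [h1, h2, h3]; simp)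

def pvContribB (lines : List String) (r : Int) (cs : List Char) (se : Nat × Nat) : List (Int × String) :=
  if ([r - 1, r, r + 1].any (fun rr =>
       (PySem.List.pyRange (max ((se.1 : Int) - 1) 0) ((min (se.2 : Int) ((cs.length : Int) - 1)) + 1)).any
         (fun cc => PySem.Set.contains (pvSymbols lines) (rr, cc))))
  then (PySem.List.pyRange (se.1 : Int) (se.2 : Int)).map
        (fun c => (c, String.ofList (PySem.List.slice cs (some (se.1 : Int)) (some (se.2 : Int)))))
  else []

theorem pvAltRow_items (lines : List String) (r : Int) (cs : List Char) :
    ∀ (n i : Nat), cs.length - i ≤ n → i ≤ cs.length →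
    ∀ (row : PySem.Dict Int String), (∀ x ∈ row.keys, x < (i : Int)) →
    (((pvRunsFrom cs i).map (fun se => ((se.1 : Int), (se.2 : Int)))).foldl
        (pvAltRowStep (pvSymbols lines) cs r) row).items
      = row.items ++ (pvRunsFrom cs i).flatMap (pvContribB lines r cs) := by
  intro n
  induction n with
  | zero =>
    intro i hn hi row hb
    have hstart : pvRunStart cs i = i := pvRunStart_stop cs i (by omega)
    rw [pvRunsFrom, dif_neg (by rw [hstart]; omega)]
    simp
  | succ n ihn =>
    intro i hn hi row hb
    have hs := pvRunStart_ge cs i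
    have hsle := pvRunStart_le cs i hi
    by_cases hsl : pvRunStart cs i < cs.length
    · set s := pvRunStart cs i with hsdef
      set e := pvRunEnd cs s with hedef
      have hdigS : pvDig cs s = true := by
        rw [hsdef]; exact pvRunStart_digit cs i (by omega)
      have hes : s < e := pvRunEnd_gt cs s hsl hdigS
      have hele : e ≤ cs.length := pvRunEnd_le cs s (by omega)
      rw [pvRunsFrom, dif_pos (by omega : pvRunStart cs i < cs.length)]
      simp only [← hsdef, ← hedef, List.map_cons, List.foldl_cons, List.flatMap_cons]
      have hstep : pvAltRowStep (pvSymbols lines) cs r row ((s : Int), (e : Int))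
          = (if ([r - 1, r, r + 1].any (fun rr =>
               (PySem.List.pyRange (max ((s : Int) - 1) 0) ((min (e : Int) ((cs.length : Int) - 1)) + 1)).any
                 (fun cc => PySem.Set.contains (pvSymbols lines) (rr, cc))))
             then (PySem.List.pyRange (s : Int) (e : Int)).foldl
               (fun row c => row.insert c (String.ofList (PySem.List.slice cs (some (s : Int)) (some (e : Int))))) row
             else row) := rfl
      rw [hstep]
      by_cases hcond : ([r - 1, r, r + 1].any (fun rr =>
           (PySem.List.pyRange (max ((s : Int) - 1) 0) ((min (e : Int) ((cs.length : Int) - 1)) + 1)).any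
             (fun cc => PySem.Set.contains (pvSymbols lines) (rr, cc)))) = true
      · rw [if_pos hcond]
        have hfresh : ((PySem.List.pyRange (s : Int) (e : Int)).foldl
            (fun row c => row.insert c (String.ofList (PySem.List.slice cs (some (s : Int)) (some (e : Int))))) row).items
            = row.items ++ (PySem.List.pyRange (s : Int) (e : Int)).map
                (fun c => (c, String.ofList (PySem.List.slice cs (some (s : Int)) (some (e : Int))))) :=
          PySem.Dict.items_foldl_insert_fresh _ (fun c => c) _ row
            (fun a ha => pvContains_false row (s : Int) a
              (fun x hx => lt_of_lt_of_le (hb x hx) (by exact_mod_cast hs))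
              (PySem.List.mem_pyRange_one.1 ha).1)
            (by simpa using PySem.List.nodup_pyRange_one (s : Int) (e : Int))
        have hkeys : ∀ x ∈ ((PySem.List.pyRange (s : Int) (e : Int)).foldl
            (fun row c => row.insert c (String.ofList (PySem.List.slice cs (some (s : Int)) (some (e : Int))))) row).keys,
            x < (e : Int) := by
          intro x hx
          rw [PySem.Dict.keys_foldl_insert _ (fun _ _ => _) row] at hx
          rcases (PySem.Set.mem_update _ _ _).1 hx with h | h
          · have := hb _ h
            have hcast : (i : Int) ≤ (e : Int) := by exact_mod_cast (by omega : i ≤ e)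
            omega
          · exact (PySem.List.mem_pyRange_one.1 h).2
        rw [ihn e (by omega) hele _ hkeys, hfresh]
        unfold pvContribB
        rw [if_pos hcond]
        simp
      · rw [if_neg hcond]
        rw [ihn e (by omega) hele row
          (fun x hx => lt_of_lt_of_le (hb x hx) (by exact_mod_cast (by omega : i ≤ e)))]
        unfold pvContribB
        rw [if_neg hcond]
        simp
    · rw [pvRunsFrom, dif_neg hsl]
      simp

theorem pvContrib_eq (lines : List String) (r : Nat) (hr : r < lines.length) :
    ∀ se ∈ pvRunsFrom (lines[r].toList) 0,
      pvContrib lines (r : Int) (lines[r].toList) se = pvContribB lines (r : Int) (lines[r].toList) se := by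
  intro se hse
  obtain ⟨-, h2, h3, h4⟩ := pvRunsFrom_spec (lines[r].toList) 0 (by omega) se hse
  unfold pvContrib pvContribB
  rw [pvPerim lines r hr se.1 se.2 h2 h3 (fun k hk1 hk2 => h4 k hk1 hk2)]
  rw [PySem.List.slice_natCast]

theorem pvRow_eq (lines : List String) (r : Nat) (hr : r < lines.length) :
    (pvRowLoop lines (r : Int) (lines[r].toList) 0 PySem.Dict.empty (lines[r].toList.length + 1)).items
      = ((pvSpans (lines[r].toList)).foldl
          (pvAltRowStep (pvSymbols lines) (lines[r].toList) (r : Int)) PySem.Dict.empty).items := by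
  have hA := pvRowLoop_items lines (r : Int) (lines[r].toList) (lines[r].toList.length + 1) 0
    PySem.Dict.empty (by omega) (by omega) (by intro x hx; simp [PySem.Dict.keys, PySem.Dict.empty] at hx)
  have hB := pvAltRow_items lines (r : Int) (lines[r].toList) (lines[r].toList.length) 0
    (by omega) (by omega) PySem.Dict.empty (by intro x hx; simp [PySem.Dict.keys, PySem.Dict.empty] at hx)
  rw [pvSpans_eq_runs]
  simp only [Nat.cast_zero] at hA hB
  rw [hA, hB]
  congr 1
  exact List.flatMap_congr (pvContrib_eq lines r hr)

theorem pvNodupFst (lines : List String) :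
    (List.map (fun p => p.1) (PySem.List.enumerate lines 0)).Nodup := by
  rw [PySem.List.map_fst_enumerate]
  exact PySem.List.nodup_pyRange_one _ _

theorem pvFinal (lines : List String) : num_str_locations lines = num_str_locations_alt lines := by
  simp only [num_str_locations, num_str_locations_alt]
  rw [PySem.Dict.items_foldl_insert_fresh (PySem.List.enumerate lines 0) (fun p => p.1)
    (fun p => pvRowLoop lines p.1 p.2.toList 0 PySem.Dict.empty (p.2.toList.length + 1))
    PySem.Dict.empty (fun a _ => rfl) (pvNodupFst lines)]
  rw [PySem.Dict.items_foldl_insert_fresh (PySem.List.enumerate lines 0) (fun p => p.1)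
    (fun p => (pvSpans p.2.toList).foldl (pvAltRowStep (pvSymbols lines) p.2.toList p.1) PySem.Dict.empty)
    PySem.Dict.empty (fun a _ => rfl) (pvNodupFst lines)]
  have hemp : (PySem.Dict.empty : PySem.Dict Int (PySem.Dict Int String)).items = [] := rfl
  rw [hemp, List.nil_append, List.nil_append, List.map_map, List.map_map]
  apply List.map_congr_left
  intro p hp
  obtain ⟨k, hk, rfl⟩ := (PySem.List.mem_enumerate_iff lines 0 p).1 hp
  simp only [Function.comp_apply, zero_add]
  exact congrArg (fun x => ((k : Int), x)) (pvRow_eq lines k hk)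

-- ===== VERDICT (by name: the statement is the Claim_ definition above) =====
theorem num_str_locations_spec : Claim_equal_num_str_locations := by
  intro lines _
  unfold Spec_num_str_locations
  exact pvFinal lines
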